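-- pv_equiv track=rewrite | github.com/fabriziotappero/ip-cores | chips2/chips/compiler/verilog_speed.py | floating_point_enables
-- ===== SOURCE A (Python) =====
-- def floating_point_enables(frames):
--     enable_adder = False
--     enable_multiplier = False
--     enable_divider = False
--     enable_int_to_float = False
--     enable_float_to_int = False
--     for frame in frames:
--         for i in frame:
--             if i["op"] == "+" and "type" in i and i["type"] == "float":
--                 enable_adder = True
--             if i["op"] == "-" and "type" in i and i["type"] == "float":
--                 enable_adder = True
--             if i["op"] == "*" and "type" in i and i["type"] == "float":
--                 enable_multiplier = True
--             if i["op"] == "/" and "type" in i and i["type"] == "float":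
--                 enable_divider = True
--             if i["op"] == "int_to_float":
--                 enable_int_to_float = True
--             if i["op"] == "float_to_int":
--                 enable_float_to_int = True
--     return (
--         enable_adder,
--         enable_multiplier,
--         enable_divider,
--         enable_int_to_float,
--         enable_float_to_int)
-- ===== SOURCE B (Python) =====
-- def floating_point_enables(frames):
--     enable_adder = any(
--         i["op"] in ("+", "-") and i.get("type") == "float"
--         for frame in frames for i in frame)
--     enable_multiplier = any(
--         i["op"] == "*" and i.get("type") == "float"
--         for frame in frames for i in frame)
--     enable_divider = any(
--         i["op"] == "/" and i.get("type") == "float"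
--         for frame in frames for i in frame)
--     enable_int_to_float = any(
--         i["op"] == "int_to_float" for frame in frames for i in frame)
--     enable_float_to_int = any(
--         i["op"] == "float_to_int" for frame in frames for i in frame)
--     return (
--         enable_adder,
--         enable_multiplier,
--         enable_divider,
--         enable_int_to_float,
--         enable_float_to_int)
-- ===== Notes on version B (the rewrite author's own statement) =====
-- stated objective: idiomatic
-- what changed: The single fused loop with six mutable flags is replaced by five independent any(...) generator-expression scans, one per returned flag, using i.get('type') instead of the 'in'-then-index pattern.
import Mathlib
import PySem

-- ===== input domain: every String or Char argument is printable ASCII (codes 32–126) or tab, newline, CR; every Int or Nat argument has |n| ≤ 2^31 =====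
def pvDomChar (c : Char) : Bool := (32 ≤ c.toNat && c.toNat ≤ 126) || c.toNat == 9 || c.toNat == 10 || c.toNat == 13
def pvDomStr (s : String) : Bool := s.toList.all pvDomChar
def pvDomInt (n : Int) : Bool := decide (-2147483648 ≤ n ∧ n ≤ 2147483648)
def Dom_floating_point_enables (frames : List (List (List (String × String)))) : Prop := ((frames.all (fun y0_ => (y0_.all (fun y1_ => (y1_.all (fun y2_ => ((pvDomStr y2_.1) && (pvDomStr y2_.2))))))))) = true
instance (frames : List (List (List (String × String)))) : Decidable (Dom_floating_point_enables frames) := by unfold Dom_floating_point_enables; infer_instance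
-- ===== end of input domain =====

-- B replaces the fused six-flag loop by five independent any(...) scans (idiomatic decomposition);
-- return-value equivalence; Pre_ excludes frames whose instruction dicts lack an "op" key (A raises KeyError there).
-- ===== PORT A =====
def fpeStep (s : Bool × Bool × Bool × Bool × Bool) (i : List (String × String)) :
    Bool × Bool × Bool × Bool × Bool :=
  let op := PySem.Dict.getD (PySem.Dict.mk i) "op" ""
  let hasT := (PySem.Dict.get? (PySem.Dict.mk i) "type").isSome
  let tFloat := PySem.Dict.getD (PySem.Dict.mk i) "type" "" == "float"
  let a := if op == "+" && hasT && tFloat then true else s.1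
  let a := if op == "-" && hasT && tFloat then true else a
  let m := if op == "*" && hasT && tFloat then true else s.2.1
  let d := if op == "/" && hasT && tFloat then true else s.2.2.1
  let i2f := if op == "int_to_float" then true else s.2.2.2.1
  let f2i := if op == "float_to_int" then true else s.2.2.2.2
  (a, m, d, i2f, f2i)

def floating_point_enables (frames : List (List (List (String × String)))) :
    Bool × Bool × Bool × Bool × Bool :=
  frames.foldl (fun s frame => frame.foldl fpeStep s) (false, false, false, false, false)

-- ===== PORT B =====
def fpeIsFloat (i : List (String × String)) : Bool :=
  PySem.Dict.get? (PySem.Dict.mk i) "type" == some "float"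

def fpeOp (i : List (String × String)) : String :=
  PySem.Dict.getD (PySem.Dict.mk i) "op" ""

def floating_point_enables_alt (frames : List (List (List (String × String)))) :
    Bool × Bool × Bool × Bool × Bool :=
  (frames.any (fun frame => frame.any (fun i => (fpeOp i == "+" || fpeOp i == "-") && fpeIsFloat i)),
   frames.any (fun frame => frame.any (fun i => fpeOp i == "*" && fpeIsFloat i)),
   frames.any (fun frame => frame.any (fun i => fpeOp i == "/" && fpeIsFloat i)),
   frames.any (fun frame => frame.any (fun i => fpeOp i == "int_to_float")),
   frames.any (fun frame => frame.any (fun i => fpeOp i == "float_to_int")))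

-- ===== PRECONDITION & SPEC =====
-- Pre_: every instruction dict has an "op" key; A (and B) raise KeyError on i["op"] otherwise.
def Pre_floating_point_enables (frames : List (List (List (String × String)))) : Prop :=
  (frames.all (fun frame => frame.all (fun i => (PySem.Dict.get? (PySem.Dict.mk i) "op").isSome))) = true
instance (frames : List (List (List (String × String)))) : Decidable (Pre_floating_point_enables frames) := by unfold Pre_floating_point_enables; infer_instance

def pvWitness_floating_point_enables : (List (List (List (String × String)))) :=
  [[[("op", "+"), ("type", "float")], [("op", "/")]], [[("op", "int_to_float")]]]

def Spec_floating_point_enables (frames : List (List (List (String × String)))) (out : Bool × Bool × Bool × Bool × Bool) : Prop := out = floating_point_enables_alt frames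
instance (frames : List (List (List (String × String)))) (out : Bool × Bool × Bool × Bool × Bool) : Decidable (Spec_floating_point_enables frames out) := by unfold Spec_floating_point_enables; infer_instance

-- ===== CLAIM (what is proved, stated in full; the proofs are below) =====
def Claim_equal_floating_point_enables : Prop := ∀ (frames : List (List (List (String × String)))), Dom_floating_point_enables frames → Pre_floating_point_enables frames → Spec_floating_point_enables frames (floating_point_enables frames)

-- ===== LEMMAS AND PROOFS =====

-- the five per-item tests B scans for
def fpeP1 (i : List (String × String)) : Bool := (fpeOp i == "+" || fpeOp i == "-") && fpeIsFloat i
def fpeP2 (i : List (String × String)) : Bool := fpeOp i == "*" && fpeIsFloat i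
def fpeP3 (i : List (String × String)) : Bool := fpeOp i == "/" && fpeIsFloat i
def fpeP4 (i : List (String × String)) : Bool := fpeOp i == "int_to_float"
def fpeP5 (i : List (String × String)) : Bool := fpeOp i == "float_to_int"

theorem fpeStep_eq (s : Bool × Bool × Bool × Bool × Bool) (i : List (String × String)) :
    fpeStep s i = (s.1 || fpeP1 i, s.2.1 || fpeP2 i, s.2.2.1 || fpeP3 i,
                   s.2.2.2.1 || fpeP4 i, s.2.2.2.2 || fpeP5 i) := by
  obtain ⟨a, m, d, x, y⟩ := s
  simp only [fpeStep, fpeP1, fpeP2, fpeP3, fpeP4, fpeP5, fpeOp, fpeIsFloat, PySem.Dict.getD]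
  generalize PySem.Dict.get? (PySem.Dict.mk i) "type" = t
  generalize (PySem.Dict.get? (PySem.Dict.mk i) "op").getD "" = op
  cases t <;> split_ifs <;> simp_all
  tauto

theorem fpe_frame_fold (frame : List (List (String × String))) (s : Bool × Bool × Bool × Bool × Bool) :
    frame.foldl fpeStep s = (s.1 || frame.any fpeP1, s.2.1 || frame.any fpeP2,
      s.2.2.1 || frame.any fpeP3, s.2.2.2.1 || frame.any fpeP4, s.2.2.2.2 || frame.any fpeP5) := by
  induction frame generalizing s with
  | nil => simp
  | cons i rest ih =>
    rw [List.foldl_cons, fpeStep_eq, ih]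
    simp [Bool.or_assoc]

theorem fpe_fold (frames : List (List (List (String × String)))) (s : Bool × Bool × Bool × Bool × Bool) :
    frames.foldl (fun s frame => frame.foldl fpeStep s) s
      = (s.1 || frames.any (fun f => f.any fpeP1), s.2.1 || frames.any (fun f => f.any fpeP2),
         s.2.2.1 || frames.any (fun f => f.any fpeP3), s.2.2.2.1 || frames.any (fun f => f.any fpeP4),
         s.2.2.2.2 || frames.any (fun f => f.any fpeP5)) := by
  induction frames generalizing s with
  | nil => simp
  | cons f rest ih =>
    rw [List.foldl_cons, fpe_frame_fold, ih]
    simp [Bool.or_assoc]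

-- ===== VERDICT (by name: the statement is the Claim_ definition above) =====
theorem floating_point_enables_spec : Claim_equal_floating_point_enables := by
  intro frames _ _
  show floating_point_enables frames = floating_point_enables_alt frames
  simp only [floating_point_enables, floating_point_enables_alt, fpe_fold]
  rfl
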